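-- pv_equiv track=rewrite | github.com/allexpy/fun_scripts | scripts/pyschools exercises/zip_comparison.py | pairwiseScore
-- ===== SOURCE A (Python) =====
-- def pairwiseScore(seqA, seqB):
-- 	score = 0
-- 	prevMatch = ""
-- 	for (A, B) in zip (seqA, seqB):
-- 		if A == B:
-- 			score += 3 if len(prevMatch) > 0 and prevMatch[-1] == '|' else 1
-- 		else:
-- 			score -= 1
-- 		prevMatch += '|' if (A == B) else ' '
-- 	return "{}\n{}\n{}\nScore: {}".format(seqA, prevMatch, seqB, score)
-- ===== SOURCE B (Python) =====
-- def pairwiseScore(seqA, seqB):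
-- 	matches = [a == b for a, b in zip(seqA, seqB)]
-- 	m = matches.count(True)
-- 	mis = len(matches) - m
-- 	c = sum(1 for x, y in zip(matches, matches[1:]) if x and y)
-- 	line = ''.join('|' if x else ' ' for x in matches)
-- 	score = m - mis + 2 * c
-- 	return "{}\n{}\n{}\nScore: {}".format(seqA, line, seqB, score)
-- ===== Notes on version B (the rewrite author's own statement) =====
-- stated objective: alternative
-- what changed: B first builds the boolean match list in one pass over zip(seqA,seqB), then computes the score by a closed-form count (matches - mismatches + 2*adjacent-match-pairs) instead of A's stateful loop that inspects the last character of the growing match string.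
import Mathlib
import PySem

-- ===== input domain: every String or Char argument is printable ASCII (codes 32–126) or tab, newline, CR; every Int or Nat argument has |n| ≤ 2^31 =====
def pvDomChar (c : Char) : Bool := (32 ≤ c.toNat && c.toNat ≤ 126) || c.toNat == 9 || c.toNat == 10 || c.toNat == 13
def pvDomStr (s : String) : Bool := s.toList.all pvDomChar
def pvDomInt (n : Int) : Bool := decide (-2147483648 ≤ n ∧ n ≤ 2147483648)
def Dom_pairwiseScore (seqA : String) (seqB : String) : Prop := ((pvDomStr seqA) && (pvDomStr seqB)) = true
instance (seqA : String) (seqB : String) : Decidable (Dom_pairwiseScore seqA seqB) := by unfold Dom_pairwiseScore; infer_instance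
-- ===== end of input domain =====

-- B replaces A's stateful score loop (which inspects the tail of the growing match string)
-- by one pass building the boolean match list and a count-based closed form for the score.

-- ===== PORT A =====
-- A's loop: state (score, prevMatch); prevMatch[-1] on a nonempty string is its last char.
def pairwiseScore (seqA : String) (seqB : String) : String :=
  let st := (seqA.toList.zip seqB.toList).foldl
    (fun (st : Int × List Char) ab =>
      let score :=
        if ab.1 == ab.2 then
          st.1 + (if 0 < st.2.length && (st.2.getLast?.getD ' ' == '|') then 3 else 1)
        else st.1 - 1
      (score, st.2 ++ [if ab.1 == ab.2 then '|' else ' ']))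
    (0, [])
  seqA ++ "\n" ++ String.mk st.2 ++ "\n" ++ seqB ++ "\nScore: " ++ PySem.Int.toStr st.1

-- ===== PORT B =====
def pairwiseScore_alt (seqA : String) (seqB : String) : String :=
  let ms := (seqA.toList.zip seqB.toList).map (fun ab => ab.1 == ab.2)
  let m : Int := ms.count true
  let mis : Int := (ms.length : Int) - m
  let c : Int := ((ms.zip ms.tail).countP (fun p => p.1 && p.2) : Int)
  let line := String.mk (ms.map (fun b => if b then '|' else ' '))
  let score := m - mis + 2 * c
  seqA ++ "\n" ++ line ++ "\n" ++ seqB ++ "\nScore: " ++ PySem.Int.toStr score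

-- ===== PRECONDITION & SPEC =====
def Spec_pairwiseScore (seqA : String) (seqB : String) (out : String) : Prop := out = pairwiseScore_alt seqA seqB
instance (seqA : String) (seqB : String) (out : String) : Decidable (Spec_pairwiseScore seqA seqB out) := by unfold Spec_pairwiseScore; infer_instance

-- ===== CLAIM (what is proved, stated in full; the proofs are below) =====
def Claim_equal_pairwiseScore : Prop := ∀ (seqA : String) (seqB : String), Dom_pairwiseScore seqA seqB → Spec_pairwiseScore seqA seqB (pairwiseScore seqA seqB)

-- ===== LEMMAS AND PROOFS =====

-- A's running score as a function of the "previous position matched" flag and the match list.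
def pvScoreOf (prev : Bool) : List Bool → Int
  | [] => 0
  | b :: rest => (if b then (if prev then 3 else 1) else -1) + pvScoreOf b rest

-- A's "len(prevMatch) > 0 and prevMatch[-1] == '|'" test equals "last element is '|'".
lemma pvLastTest (acc : List Char) :
    (decide (0 < acc.length) && (acc.getLast?.getD ' ' == '|')) = (acc.getLast? == some '|') := by
  cases h : acc.getLast? with
  | none =>
      have : acc = [] := List.getLast?_eq_none_iff.mp h
      subst this; rfl
  | some c =>
      have : acc ≠ [] := by
        intro hn; subst hn; simp at h
      simp [List.length_pos_iff.mpr this]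

-- Unrolling A's fold: final match string and score in closed form.
lemma pvLoopA (zs : List (Char × Char)) (score : Int) (acc : List Char) :
    zs.foldl
      (fun (st : Int × List Char) ab =>
        let s :=
          if ab.1 == ab.2 then
            st.1 + (if 0 < st.2.length && (st.2.getLast?.getD ' ' == '|') then 3 else 1)
          else st.1 - 1
        (s, st.2 ++ [if ab.1 == ab.2 then '|' else ' '])) (score, acc) =
      (score + pvScoreOf (acc.getLast? == some '|') (zs.map fun ab => ab.1 == ab.2),
       acc ++ (zs.map fun ab => ab.1 == ab.2).map (fun b => if b then '|' else ' ')) := by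
  induction zs generalizing score acc with
  | nil => simp [pvScoreOf]
  | cons ab rest ih =>
      simp only [List.foldl_cons, List.map_cons]
      rw [ih]
      rcases hab : (ab.1 == ab.2) with _ | _ <;>
        simp [pvScoreOf, pvLastTest, hab, List.getLast?_append, sub_eq_add_neg, add_assoc]

-- The count-based closed form for pvScoreOf.
lemma pvScoreOf_counts (prev : Bool) (ms : List Bool) :
    pvScoreOf prev ms = (ms.count true : Int) - ((ms.length : Int) - ms.count true)
      + 2 * (((ms.zip ms.tail).countP (fun p => p.1 && p.2) : Int)
             + (if prev && ms.headD false then 1 else 0)) := by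
  induction ms generalizing prev with
  | nil => simp [pvScoreOf]
  | cons b rest ih =>
      cases rest with
      | nil => cases b <;> cases prev <;> simp [pvScoreOf]
      | cons r rs =>
          have h := ih b
          simp only [pvScoreOf, List.tail_cons, List.zip_cons_cons, List.countP_cons,
            List.count_cons, List.length_cons, List.headD_cons] at h ⊢
          cases b <;> cases prev <;> cases r <;> simp_all <;> omega

-- ===== VERDICT (by name: the statement is the Claim_ definition above) =====
theorem pairwiseScore_spec : Claim_equal_pairwiseScore := by
  intro seqA seqB _
  show pairwiseScore seqA seqB = pairwiseScore_alt seqA seqB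
  unfold pairwiseScore pairwiseScore_alt
  simp only [pvLoopA, List.nil_append, List.getLast?_nil, zero_add]
  rw [pvScoreOf_counts]
  simp
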